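-- pv_equiv track=rewrite | github.com/LuisAndree/cripto-2024 | cifra de hill/criptografar.py | hill_cipher_cifrar
-- ===== SOURCE A (Python) =====
-- def gerar_matriz_chave(chave, tamanho):
--     chave = chave.lower().replace(" ", "")
--     matriz_chave = []
--     indice = 0
--     for i in range(tamanho):
--         linha = []
--         for j in range(tamanho):
--             if indice < len(chave):
--                 linha.append(ord(chave[indice]) - ord('a'))
--             else:
--                 linha.append(0)
--             indice += 1
--         matriz_chave.append(linha)
--     return matriz_chave
--
-- def mod26_matrix_mult(A, B):
--     tamanho = len(A)
--     resultado = [[0] * len(B[0]) for _ in range(tamanho)]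
--     for i in range(tamanho):
--         for j in range(len(B[0])):
--             for k in range(tamanho):
--                 resultado[i][j] += A[i][k] * B[k][j]
--             resultado[i][j] %= 26
--     return resultado
--
-- def hill_cipher_cifrar(mensagem, chave):
--     tamanho = 2
--     matriz_chave = gerar_matriz_chave(chave, tamanho)
--
--     mensagem = mensagem.lower().replace(" ", "")
--     while len(mensagem) % tamanho != 0:
--         mensagem += 'x'
--
--     mensagem_numerica = [[ord(char) - ord('a')] for char in mensagem]
--
--     mensagem_cifrada = ''
--     for i in range(0, len(mensagem), tamanho):
--         bloco = mensagem_numerica[i:i+tamanho]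
--         bloco_cifrado = mod26_matrix_mult(matriz_chave, bloco)
--         mensagem_cifrada += ''.join(chr(num[0] + ord('a')) for num in bloco_cifrado)
--
--     return mensagem_cifrada
-- ===== SOURCE B (Python) =====
-- def hill_cipher_cifrar(mensagem, chave):
--     k = chave.lower().replace(" ", "")
--     a, b, c, d = (ord(k[i]) - 97 if i < len(k) else 0 for i in range(4))
--     msg = mensagem.lower().replace(" ", "")
--     if len(msg) % 2:
--         msg += 'x'
--     out = []
--     for i in range(0, len(msg), 2):
--         x, y = ord(msg[i]) - 97, ord(msg[i + 1]) - 97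
--         out.append(chr((a * x + b * y) % 26 + 97))
--         out.append(chr((c * x + d * y) % 26 + 97))
--     return ''.join(out)
-- ===== Notes on version B (the rewrite author's own statement) =====
-- stated objective: simpler
-- what changed: Replaces the generic key-matrix builder and the triple-nested mod-26 matrix multiplication over list-of-lists blocks with four flat key scalars and a direct two-character formula per message pair, joined at the end.
import Mathlib
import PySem

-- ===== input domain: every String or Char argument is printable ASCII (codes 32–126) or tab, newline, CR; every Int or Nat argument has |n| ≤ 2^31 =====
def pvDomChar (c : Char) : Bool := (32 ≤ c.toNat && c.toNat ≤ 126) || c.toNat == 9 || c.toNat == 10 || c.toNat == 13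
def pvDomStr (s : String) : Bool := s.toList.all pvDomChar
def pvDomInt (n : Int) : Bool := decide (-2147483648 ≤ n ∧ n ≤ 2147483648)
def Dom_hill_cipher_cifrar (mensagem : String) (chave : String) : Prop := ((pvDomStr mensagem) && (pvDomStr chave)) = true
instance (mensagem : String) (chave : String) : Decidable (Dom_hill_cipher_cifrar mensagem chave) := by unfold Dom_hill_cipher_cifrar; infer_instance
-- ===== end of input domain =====

-- B replaces A's generic key-matrix builder and triple-nested mod-26 matrix multiply on
-- list-of-lists blocks by four flat key scalars and a direct two-character formula per pair
-- (objective: simpler; same behaviour on every input).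

-- ===== PORT A =====
def pvOrd (c : Char) : Int := (c.toNat : Int)   -- ord(c); exact for code points
def pvChr (n : Int) : Char := Char.ofNat n.toNat   -- chr(n); exact for 0 ≤ n < 0xD800 (here 97..122)

def gerar_matriz_chave (chave : String) (tamanho : Int) : List (List Int) :=
  let k := PySem.Chars.replace (PySem.Chars.lower chave.toList) [' '] []
  let st := (PySem.List.pyRange 0 tamanho 1).foldl (fun (st : List (List Int) × Int) _i =>
      let inner := (PySem.List.pyRange 0 tamanho 1).foldl (fun (st2 : List Int × Int) _j =>
          let linha := if st2.2 < PySem.List.len k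
                       then st2.1 ++ [pvOrd (PySem.List.pyGetD k st2.2 'a') - pvOrd 'a']
                       else st2.1 ++ [0]
          (linha, st2.2 + 1)) ([], st.2)
      (st.1 ++ [inner.1], inner.2)) ([], 0)
  st.1

def mod26_matrix_mult (A B : List (List Int)) : List (List Int) :=
  let tamanho := PySem.List.len A
  let cols := PySem.List.len (PySem.List.pyGetD B 0 [])
  (PySem.List.pyRange 0 tamanho 1).foldl (fun res i =>
    res ++ [ (PySem.List.pyRange 0 cols 1).foldl (fun row j =>
        row ++ [ PySem.Int.mod ((PySem.List.pyRange 0 tamanho 1).foldl (fun s k =>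
            s + PySem.List.pyGetD (PySem.List.pyGetD A i []) k 0 *
                PySem.List.pyGetD (PySem.List.pyGetD B k []) j 0) 0) 26 ]) [] ]) []

-- A's while-loop: append 'x' while the length is odd (runs at most once, measure = parity)
def pvPadX (m : List Char) : List Char :=
  if PySem.Int.mod (PySem.List.len m) 2 ≠ 0 then pvPadX (m ++ ['x']) else m
termination_by (PySem.List.len m).toNat % 2
decreasing_by
  simp only [PySem.List.len_eq, List.length_append, List.length_cons, List.length_nil,
    PySem.Int.mod_eq_emod_of_pos (by omega : (0:Int) < 2)] at *
  omega

def hill_cipher_cifrar (mensagem : String) (chave : String) : String :=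
  let tamanho : Int := 2
  let matriz := gerar_matriz_chave chave tamanho
  let m := pvPadX (PySem.Chars.replace (PySem.Chars.lower mensagem.toList) [' '] [])
  let numerica := m.map (fun c => [pvOrd c - pvOrd 'a'])
  let out := (PySem.List.pyRange 0 (PySem.List.len m) tamanho).foldl (fun acc i =>
      let bloco := PySem.List.slice numerica (some i) (some (i + tamanho))
      let cifrado := mod26_matrix_mult matriz bloco
      acc ++ cifrado.map (fun num => pvChr (PySem.List.pyGetD num 0 0 + pvOrd 'a'))) []
  String.ofList out

-- ===== PORT B =====
def pvKeyAt (k : List Char) (i : Int) : Int :=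
  if i < PySem.List.len k then pvOrd (PySem.List.pyGetD k i 'a') - pvOrd 'a' else 0

def hill_cipher_cifrar_alt (mensagem : String) (chave : String) : String :=
  let k := PySem.Chars.replace (PySem.Chars.lower chave.toList) [' '] []
  let a := pvKeyAt k 0
  let b := pvKeyAt k 1
  let c := pvKeyAt k 2
  let d := pvKeyAt k 3
  let msg0 := PySem.Chars.replace (PySem.Chars.lower mensagem.toList) [' '] []
  let msg := if PySem.Int.mod (PySem.List.len msg0) 2 ≠ 0 then msg0 ++ ['x'] else msg0
  let out := (PySem.List.pyRange 0 (PySem.List.len msg) 2).foldl (fun acc i =>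
      let x := pvOrd (PySem.List.pyGetD msg i ' ') - pvOrd 'a'
      let y := pvOrd (PySem.List.pyGetD msg (i + 1) ' ') - pvOrd 'a'
      acc ++ [pvChr (PySem.Int.mod (a * x + b * y) 26 + pvOrd 'a')] ++
             [pvChr (PySem.Int.mod (c * x + d * y) 26 + pvOrd 'a')]) []
  String.ofList out

-- ===== PRECONDITION & SPEC =====
def Spec_hill_cipher_cifrar (mensagem : String) (chave : String) (out : String) : Prop := out = hill_cipher_cifrar_alt mensagem chave
instance (mensagem : String) (chave : String) (out : String) : Decidable (Spec_hill_cipher_cifrar mensagem chave out) := by unfold Spec_hill_cipher_cifrar; infer_instance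

-- ===== CLAIM (what is proved, stated in full; the proofs are below) =====
def Claim_equal_hill_cipher_cifrar : Prop := ∀ (mensagem : String) (chave : String), Dom_hill_cipher_cifrar mensagem chave → Spec_hill_cipher_cifrar mensagem chave (hill_cipher_cifrar mensagem chave)

-- ===== LEMMAS AND PROOFS =====
lemma gerar_eq (chave : String) :
    gerar_matriz_chave chave 2 =
      (let k := PySem.Chars.replace (PySem.Chars.lower chave.toList) [' '] []
       [[pvKeyAt k 0, pvKeyAt k 1], [pvKeyAt k 2, pvKeyAt k 3]]) := by
  simp only [gerar_matriz_chave, show PySem.List.pyRange 0 2 1 = [0,1] from by decide,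
    List.foldl, pvKeyAt]
  norm_num
  constructor <;> split_ifs <;> simp_all
lemma padX_eq (m : List Char) :
    pvPadX m = (if PySem.Int.mod (PySem.List.len m) 2 ≠ 0 then m ++ ['x'] else m) := by
  by_cases h : PySem.Int.mod (PySem.List.len m) 2 ≠ 0
  · rw [pvPadX, if_pos h, pvPadX, if_neg, if_pos h]
    rw [PySem.Int.mod_eq_emod_of_pos (by omega)] at h ⊢
    simp only [PySem.List.len_eq, List.length_append, List.length_cons, List.length_nil] at *
    omega
  · rw [pvPadX, if_neg h, if_neg h]

lemma padX_even (m : List Char) : (pvPadX m).length % 2 = 0 := by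
  rw [padX_eq]
  split_ifs with h <;>
  · rw [PySem.Int.mod_eq_emod_of_pos (by omega)] at h
    simp only [PySem.List.len_eq, List.length_append, List.length_cons, List.length_nil] at *
    omega
lemma block_eq (e0 e1 e2 e3 vx vy : Int) :
    mod26_matrix_mult [[e0, e1], [e2, e3]] [[vx], [vy]] =
      [[PySem.Int.mod (e0 * vx + e1 * vy) 26], [PySem.Int.mod (e2 * vx + e3 * vy) 26]] := by
  simp only [mod26_matrix_mult, PySem.List.len_eq, List.length_cons, List.length_nil]
  norm_num [show PySem.List.pyRange 0 2 1 = [0, 1] from by decide,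
    show PySem.List.pyRange 0 1 1 = [0] from by decide, List.foldl,
    PySem.List.pyGetD_zero_cons, PySem.List.pyGetD_ofNat']
theorem hill_cipher_cifrar_spec : Claim_equal_hill_cipher_cifrar := by
  intro mensagem chave _
  unfold Spec_hill_cipher_cifrar
  simp only [hill_cipher_cifrar, hill_cipher_cifrar_alt, gerar_eq, ← padX_eq]
  set k := PySem.Chars.replace (PySem.Chars.lower chave.toList) [' '] [] with hk
  set m := pvPadX (PySem.Chars.replace (PySem.Chars.lower mensagem.toList) [' '] []) with hm
  have hev : m.length % 2 = 0 := padX_even _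
  congr 1
  apply PySem.List.foldl_congr_mem
  intro acc i hi
  rw [PySem.List.mem_pyRange_iff_of_pos (by omega)] at hi
  simp only [PySem.List.len_eq] at hi
  obtain ⟨h0, h1, h2⟩ := hi
  have hj1 : i.toNat + 1 < m.length := by omega
  have hj0 : i.toNat < m.length := by omega
  rw [PySem.List.slice_toNat _ h0 (by omega)]
  have : (i + 2).toNat - i.toNat = 2 := by omega
  rw [this, ← List.map_drop, List.drop_eq_getElem_cons hj0, List.drop_eq_getElem_cons hj1]
  simp only [List.map_cons, List.take_succ_cons, List.take_zero]
  rw [block_eq]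
  rw [PySem.List.pyGetD_eq_getElem _ _ h0 (by omega),
      PySem.List.pyGetD_eq_getElem _ _ (by omega) (by omega)]
  have h2' : (i + 1).toNat = i.toNat + 1 := by omega
  simp [h2', PySem.List.pyGetD_zero_cons, List.append_assoc]
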